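-- pv_equiv track=rewrite | github.com/danieleschmidt/protein-sssl-operator | protein_sssl/utils/validation.py | _find_max_repeat
-- ===== SOURCE A (Python) =====
-- def _find_max_repeat(sequence: str, aa: str) -> int:
--     """Find maximum consecutive repeat of an amino acid"""
--     max_repeat = 0
--     current_repeat = 0
--
--     for char in sequence:
--         if char == aa:
--             current_repeat += 1
--             max_repeat = max(max_repeat, current_repeat)
--         else:
--             current_repeat = 0
--
--     return max_repeat
-- ===== SOURCE B (Python) =====
-- from itertools import groupby
--
--
-- def _find_max_repeat(sequence: str, aa: str) -> int:
--     """Find maximum consecutive repeat of an amino acid (group-then-reduce)."""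
--     return max((sum(1 for _ in g) for k, g in groupby(sequence) if k == aa),
--                default=0)
-- ===== Notes on version B (the rewrite author's own statement) =====
-- stated objective: idiomatic
-- what changed: Replaces the running-counter/max accumulator loop with a group-then-reduce pass: itertools.groupby segments the string into maximal runs, and the result is the max length over runs whose key equals aa (default 0).
import Mathlib
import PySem

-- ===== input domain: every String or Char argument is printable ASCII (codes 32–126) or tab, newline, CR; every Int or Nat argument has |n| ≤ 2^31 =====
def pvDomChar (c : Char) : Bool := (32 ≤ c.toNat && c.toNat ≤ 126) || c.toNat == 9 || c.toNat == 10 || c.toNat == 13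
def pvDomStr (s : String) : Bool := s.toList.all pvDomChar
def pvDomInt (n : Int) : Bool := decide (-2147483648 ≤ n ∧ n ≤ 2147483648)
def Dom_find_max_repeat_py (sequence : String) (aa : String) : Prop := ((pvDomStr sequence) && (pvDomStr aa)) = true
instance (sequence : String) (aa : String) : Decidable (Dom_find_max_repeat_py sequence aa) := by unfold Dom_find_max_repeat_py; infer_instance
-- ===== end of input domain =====

-- B replaces A's running-counter/max accumulator with a group-then-reduce pass
-- (split into maximal runs, then max of lengths of runs keyed by aa); idiomatic, same O(n) cost.

-- ===== PORT A =====
-- state = (max_repeat, current_repeat); one pass over the characters, as in A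
def find_max_repeat_py (sequence : String) (aa : String) : Int :=
  (sequence.toList.foldl
    (fun (st : Int × Int) char =>
      if String.ofList [char] = aa then (max st.1 (st.2 + 1), st.2 + 1) else (st.1, 0))
    (0, 0)).1

-- ===== PORT B =====
-- itertools.groupby: list of (key, run length) for the maximal runs of equal chars
def pyGroupby : List Char → List (Char × Int)
  | [] => []
  | c :: rest =>
      (c, 1 + ((rest.takeWhile (fun x => x = c)).length : Int)) ::
        pyGroupby (rest.dropWhile (fun x => x = c))
  termination_by l => l.length
  decreasing_by
    simpa using Nat.lt_succ_of_le (List.length_dropWhile_le _ _)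

-- Python max(..., default=0): 0 on the empty list, else the max of the elements
def pyMaxD0 : List Int → Int
  | [] => 0
  | x :: xs => xs.foldl max x

def find_max_repeat_py_alt (sequence : String) (aa : String) : Int :=
  pyMaxD0
    (((pyGroupby sequence.toList).filter (fun p => String.ofList [p.1] = aa)).map Prod.snd)

-- ===== PRECONDITION & SPEC =====
def Spec_find_max_repeat_py (sequence : String) (aa : String) (out : Int) : Prop := out = find_max_repeat_py_alt sequence aa
instance (sequence : String) (aa : String) (out : Int) : Decidable (Spec_find_max_repeat_py sequence aa out) := by unfold Spec_find_max_repeat_py; infer_instance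

-- ===== CLAIM (what is proved, stated in full; the proofs are below) =====
def Claim_equal_find_max_repeat_py : Prop := ∀ (sequence : String) (aa : String), Dom_find_max_repeat_py sequence aa → Spec_find_max_repeat_py sequence aa (find_max_repeat_py sequence aa)

-- ===== LEMMAS AND PROOFS =====

-- best run ending constraint: value of A's loop from state (·, cur), ignoring the max accumulator
def bestFrom (aa : String) : List Char → Int → Int
  | [], _ => 0
  | ch :: rest, cur =>
      if String.ofList [ch] = aa then max (cur + 1) (bestFrom aa rest (cur + 1))
      else bestFrom aa rest 0

lemma loopA_eq_bestFrom (aa : String) (l : List Char) :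
    ∀ m c : Int, 0 ≤ m →
      (l.foldl
        (fun (st : Int × Int) char =>
          if String.ofList [char] = aa then (max st.1 (st.2 + 1), st.2 + 1) else (st.1, 0))
        (m, c)).1 = max m (bestFrom aa l c) := by
  induction l with
  | nil => intro m c hm; simp [bestFrom, max_eq_left hm]
  | cons ch rest ih =>
    intro m c hm
    by_cases h : String.ofList [ch] = aa
    · simp only [List.foldl_cons, bestFrom, h, if_pos]
      rw [ih (max m (c + 1)) (c + 1) (le_trans hm (le_max_left _ _)), max_assoc]
    · simp only [List.foldl_cons, bestFrom, h, ite_false]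
      exact ih m 0 hm

lemma bestFrom_reset (aa : String) (c : Char) (d : List Char)
    (hc : String.ofList [c] = aa) (hd : ∀ e ∈ d.head?, e ≠ c) (x : Int) :
    bestFrom aa d x = bestFrom aa d 0 := by
  cases d with
  | nil => rfl
  | cons e d' =>
    have he : e ≠ c := hd e (by simp)
    have : String.ofList [e] ≠ aa := by
      intro h
      have h2 : e = c := by simpa [String.ofList_inj] using h.trans hc.symm
      exact he h2
    simp [bestFrom, this]

lemma bestFrom_run_match (aa : String) (c : Char) (d : List Char)
    (hc : String.ofList [c] = aa) (hd : ∀ e ∈ d.head?, e ≠ c) :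
    ∀ (t : List Char), (∀ x ∈ t, x = c) → ∀ cur : Int,
      bestFrom aa (c :: (t ++ d)) cur = max (cur + 1 + t.length) (bestFrom aa d 0) := by
  intro t
  induction t with
  | nil =>
    intro _ cur
    simp [bestFrom, hc, bestFrom_reset aa c d hc hd]
  | cons x t' ih =>
    intro ht cur
    have hx : x = c := ht x (by simp)
    subst hx
    have ht' : ∀ y ∈ t', y = x := fun y hy => ht y (by simp [hy])
    show bestFrom aa (x :: (x :: (t' ++ d))) cur = _
    rw [bestFrom, if_pos hc, ih ht' (cur + 1)]
    have hcast : cur + 1 + 1 + (t'.length : Int) = cur + 1 + ((x :: t').length : Int) := by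
      simp only [List.length_cons]; push_cast; ring
    rw [hcast, max_eq_right (le_trans (by simp only [List.length_cons]; push_cast; omega) (le_max_left _ _))]

lemma bestFrom_run_nomatch (aa : String) (c : Char) (d : List Char)
    (hc : String.ofList [c] ≠ aa) :
    ∀ (t : List Char), (∀ x ∈ t, x = c) → ∀ cur : Int,
      bestFrom aa (c :: (t ++ d)) cur = bestFrom aa d 0 := by
  intro t
  induction t with
  | nil => intro _ cur; simp [bestFrom, hc]
  | cons x t' ih =>
    intro ht cur
    have hx : x = c := ht x (by simp)
    subst hx
    have ht' : ∀ y ∈ t', y = x := fun y hy => ht y (by simp [hy])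
    show bestFrom aa (x :: (x :: (t' ++ d))) cur = _
    rw [bestFrom, if_neg hc]
    exact ih ht' 0

lemma foldl_max_init (a : Int) : ∀ (ys : List Int) (b : Int),
    ys.foldl max (max a b) = max a (ys.foldl max b) := by
  intro ys
  induction ys with
  | nil => intro b; rfl
  | cons z zs ih => intro b; simp only [List.foldl_cons, max_assoc, ih]

lemma pyMaxD0_cons (x : Int) (xs : List Int) (hx : 0 ≤ x) :
    pyMaxD0 (x :: xs) = max x (pyMaxD0 xs) := by
  cases xs with
  | nil => simp [pyMaxD0, max_eq_left hx]
  | cons y ys => simp only [pyMaxD0, List.foldl_cons]; rw [← foldl_max_init]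

lemma head_dropWhile_ne (c : Char) : ∀ (l : List Char),
    ∀ e ∈ (l.dropWhile (fun x => x = c)).head?, e ≠ c := by
  intro l
  induction l with
  | nil => intro e he; simp at he
  | cons x xs ih =>
    intro e he
    by_cases hx : x = c
    · rw [List.dropWhile_cons_of_pos (by simp [hx])] at he
      exact ih e he
    · rw [List.dropWhile_cons_of_neg (by simp [hx])] at he
      simp at he; simpa [he] using hx

-- B's reduction over groups
def maxMatch (aa : String) (rs : List (Char × Int)) : Int :=
  pyMaxD0 ((rs.filter (fun p => String.ofList [p.1] = aa)).map Prod.snd)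

lemma main_eq (aa : String) : ∀ (l : List Char),
    max 0 (bestFrom aa l 0) = maxMatch aa (pyGroupby l) := by
  intro l
  induction hn : l.length using Nat.strong_induction_on generalizing l with
  | _ n ih =>
  cases l with
  | nil => simp [bestFrom, pyGroupby, maxMatch, pyMaxD0]
  | cons c rest =>
    subst hn
    set t := rest.takeWhile (fun x => x = c) with htdef
    set d := rest.dropWhile (fun x => x = c) with hddef
    have hsplit : rest = t ++ d := (List.takeWhile_append_dropWhile).symm
    have htmem : ∀ x ∈ t, x = c := by
      intro x hx
      simpa using List.mem_takeWhile_imp hx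
    have hdhead : ∀ e ∈ d.head?, e ≠ c := head_dropWhile_ne c rest
    have hdlen : d.length < (c :: rest).length := by
      simp only [List.length_cons]
      exact Nat.lt_succ_of_le (List.length_dropWhile_le _ _)
    have ihd := ih d.length hdlen d rfl
    have hgb : pyGroupby (c :: rest) = (c, 1 + (t.length : Int)) :: pyGroupby d := by
      rw [pyGroupby]
    by_cases h : String.ofList [c] = aa
    · have hb := bestFrom_run_match aa c d h hdhead t htmem 0
      have hlen : (0 : Int) ≤ 1 + (t.length : Int) := by
        have : (0 : Int) ≤ t.length := Int.natCast_nonneg _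
        omega
      rw [hgb]
      unfold maxMatch
      rw [List.filter_cons_of_pos (by simp [h]), List.map_cons,
        pyMaxD0_cons _ _ hlen]
      rw [hsplit, hb,
        show (0 : Int) + 1 + (t.length : Int) = 1 + t.length from by ring,
        max_left_comm, ihd]
      rfl
    · have hb := bestFrom_run_nomatch aa c d h t htmem 0
      rw [hgb]
      unfold maxMatch
      rw [List.filter_cons_of_neg (by simp [h])]
      rw [hsplit, hb, ihd]
      rfl

-- ===== VERDICT (by name: the statement is the Claim_ definition above) =====
theorem find_max_repeat_py_spec : Claim_equal_find_max_repeat_py := by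
  intro sequence aa _
  show find_max_repeat_py sequence aa = find_max_repeat_py_alt sequence aa
  unfold find_max_repeat_py find_max_repeat_py_alt
  rw [loopA_eq_bestFrom aa sequence.toList 0 0 le_rfl]
  exact main_eq aa sequence.toList
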